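-- pv_equiv track=rewrite | github.com/PongC/SecureCRT-project | SecureCRT-project/new version/CRTproj16.py | searchKey2
-- ===== SOURCE A (Python) =====
-- def searchKey2(result_array,key_list):
-- 	results=[]
-- 	for i in range(len(key_list)):
-- 		if(key_list[i]==[]):
-- 			results.append("") #do nothing, append empty string into the cell
-- 		else:
-- 			result=""
-- 			lines=result_array[i].split("\n")
-- 			for line in lines:
-- 				if any(key in line for key in key_list[i]):
-- 					result=result+line+"\n"
-- 			if(result==""):
-- 				results.append("Not found any result in key="+str(key_list[i]))
-- 			else:
-- 				results.append(str(key_list[i])+" search result:\n"+result)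
-- 	return results
-- ===== SOURCE B (Python) =====
-- def searchKey2(result_array, key_list):
--     def cell(i, keys):
--         if not keys:
--             return ""
--         lines = result_array[i].split("\n")
--         hit = [False] * len(lines)
--         for key in keys:
--             hit = [h or (key in line) for h, line in zip(hit, lines)]
--         body = "".join(line + "\n" for line, h in zip(lines, hit) if h)
--         if not body:
--             return "Not found any result in key=" + str(keys)
--         return str(keys) + " search result:\n" + body
--     return [cell(i, keys) for i, keys in enumerate(key_list)]
-- ===== Notes on version B (the rewrite author's own statement) =====
-- stated objective: alternative
-- what changed: A accumulates one growing result string while scanning lines with an any-key inner test; B interchanges the loops (keys outer) to mark matching lines in a boolean mask built by zip/or passes and emits the cell with a single join over the masked lines.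
import Mathlib
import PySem

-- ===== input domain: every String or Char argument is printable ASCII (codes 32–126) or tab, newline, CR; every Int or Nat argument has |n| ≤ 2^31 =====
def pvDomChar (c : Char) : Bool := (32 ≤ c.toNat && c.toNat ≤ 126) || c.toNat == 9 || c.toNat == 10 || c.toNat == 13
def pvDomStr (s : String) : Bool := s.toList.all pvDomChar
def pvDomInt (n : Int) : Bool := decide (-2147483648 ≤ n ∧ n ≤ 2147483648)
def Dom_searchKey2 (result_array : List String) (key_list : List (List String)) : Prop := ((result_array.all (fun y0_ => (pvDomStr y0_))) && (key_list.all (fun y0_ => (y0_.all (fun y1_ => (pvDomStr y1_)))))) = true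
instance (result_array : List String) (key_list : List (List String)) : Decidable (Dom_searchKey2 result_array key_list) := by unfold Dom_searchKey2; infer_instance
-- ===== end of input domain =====

-- B replaces A's per-line `any(key in line …)` accumulation of one growing string by a
-- key-outer marking pass over a boolean line mask followed by a single join (objective: alternative).
-- Shared hand ports of Python built-ins (used by BOTH ports, as both Pythons call them):
-- Python 'a + b' on str (exact: concatenation)
def pyCat (a b : String) : String := String.ofList (a.toList ++ b.toList)

-- Python repr(s) for one str — exact for the Dom character set (printable ASCII, tab, newline, CR):
-- single quotes unless s contains ' and no ", escapes \\ , the quote, \n, \r, \t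
def pyReprChars (cs : List Char) : List Char :=
  let q : Char := if '\'' ∈ cs ∧ '"' ∉ cs then '"' else '\''
  q :: cs.flatMap (fun c =>
    if c = '\\' then ['\\', '\\']
    else if c = q then ['\\', q]
    else if c = '\n' then ['\\', 'n']
    else if c = '\r' then ['\\', 'r']
    else if c = '\t' then ['\\', 't']
    else [c]) ++ [q]

-- Python str(ks) for a list of str — '[' + ', '.join(repr(k)) + ']' (exact on Dom)
def pyReprStrList (ks : List String) : String :=
  String.ofList ('[' :: PySem.Chars.join [',', ' '] (ks.map (fun s => pyReprChars s.toList)) ++ [']'])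

-- ===== PORT A =====
def searchKey2 (result_array : List String) (key_list : List (List String)) : List String :=
  (PySem.List.pyRange 0 (key_list.length : Int)).foldl (fun results i =>
    let keys := PySem.List.pyGetD key_list i []
    if keys = [] then results ++ [""]
    else
      -- result_array[i]: Python raises IndexError out of range; Pre_ excludes that, the default "" only makes the port total
      let lines := (PySem.Str.split? (PySem.List.pyGetD result_array i "") "\n").getD []
      let result := lines.foldl (fun result line =>
        if keys.any (fun key => PySem.Str.isIn key line) then pyCat (pyCat result line) "\n"
        else result) ""
      if result = "" then results ++ [pyCat "Not found any result in key=" (pyReprStrList keys)]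
      else results ++ [pyCat (pyCat (pyReprStrList keys) " search result:\n") result]) []

-- ===== PORT B =====
def cellB (result_array : List String) (i : Int) (keys : List String) : String :=
  if keys = [] then ""
  else
    let lines := (PySem.Str.split? (PySem.List.pyGetD result_array i "") "\n").getD []
    let hit := keys.foldl (fun hit key =>
      (hit.zip lines).map (fun p => p.1 || PySem.Str.isIn key p.2)) (List.replicate lines.length false)
    let body := PySem.Str.join "" (((lines.zip hit).filter (fun p => p.2)).map (fun p => pyCat p.1 "\n"))
    if body = "" then pyCat "Not found any result in key=" (pyReprStrList keys)
    else pyCat (pyCat (pyReprStrList keys) " search result:\n") body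

def searchKey2_alt (result_array : List String) (key_list : List (List String)) : List String :=
  (PySem.List.enumerate key_list).map (fun ik => cellB result_array ik.1 ik.2)

-- ===== PRECONDITION & SPEC =====
-- Pre_: Python A raises IndexError when some cell with a non-empty key list has no text
-- (index i beyond result_array); exactly those inputs are excluded.
def Pre_searchKey2 (result_array : List String) (key_list : List (List String)) : Prop :=
  ∀ i : Nat, i < key_list.length → key_list.getD i [] ≠ [] → i < result_array.length
instance (result_array : List String) (key_list : List (List String)) : Decidable (Pre_searchKey2 result_array key_list) := by unfold Pre_searchKey2; infer_instance

def pvWitness_searchKey2 : List String × List (List String) := (["abc\ndef", "xy"], [["b", "q"], []])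

def Spec_searchKey2 (result_array : List String) (key_list : List (List String)) (out : List String) : Prop := out = searchKey2_alt result_array key_list
instance (result_array : List String) (key_list : List (List String)) (out : List String) : Decidable (Spec_searchKey2 result_array key_list out) := by unfold Spec_searchKey2; infer_instance

-- ===== CLAIM (what is proved, stated in full; the proofs are below) =====
def Claim_equal_searchKey2 : Prop := ∀ (result_array : List String) (key_list : List (List String)), Dom_searchKey2 result_array key_list → Pre_searchKey2 result_array key_list → Spec_searchKey2 result_array key_list (searchKey2 result_array key_list)

-- ===== LEMMAS AND PROOFS =====

theorem pyCat_assoc (a b c : String) : pyCat (pyCat a b) c = pyCat a (pyCat b c) := by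
  apply String.toList_inj.mp; simp [pyCat]

theorem pyCat_empty (a : String) : pyCat a "" = a := by
  apply String.toList_inj.mp; simp [pyCat]

theorem empty_pyCat (a : String) : pyCat "" a = a := by
  apply String.toList_inj.mp; simp [pyCat]

theorem charsJoin_nil_cons (c : List Char) (cs : List (List Char)) :
    PySem.Chars.join [] (c :: cs) = c ++ PySem.Chars.join [] cs := by
  cases cs with
  | nil => simp [PySem.Chars.join_singleton, PySem.Chars.join_nil]
  | cons d ds => simp [PySem.Chars.join_cons_cons]

theorem join_empty_cons (x : String) (xs : List String) :
    PySem.Str.join "" (x :: xs) = pyCat x (PySem.Str.join "" xs) := by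
  apply String.toList_inj.mp
  simp [pyCat, PySem.Str.toList_join, charsJoin_nil_cons]

theorem join_empty_nil : PySem.Str.join "" ([] : List String) = "" := by
  apply String.toList_inj.mp
  simp [PySem.Str.toList_join, PySem.Chars.join_nil]

-- A's inner loop (string accumulation) equals a join over the filtered lines
theorem foldl_cat_eq_join (p : String → Bool) :
    ∀ (lines : List String) (acc : String),
      lines.foldl (fun r ln => if p ln then pyCat (pyCat r ln) "\n" else r) acc
      = pyCat acc (PySem.Str.join "" ((lines.filter p).map (fun ln => pyCat ln "\n"))) := by
  intro lines
  induction lines with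
  | nil => intro acc; simp [join_empty_nil, pyCat_empty]
  | cons ln ls ih =>
    intro acc
    by_cases h : p ln = true
    · rw [List.foldl_cons, if_pos h, ih, List.filter_cons_of_pos h, List.map_cons,
        join_empty_cons]
      simp [pyCat_assoc]
    · rw [List.foldl_cons, if_neg (by simp [h]), ih, List.filter_cons_of_neg (by simp [h])]

-- B's zip-map step is a zipWith
theorem zip_map_eq_zipWith (f : Bool → String → Bool) :
    ∀ (hs : List Bool) (ls : List String),
      (hs.zip ls).map (fun p => f p.1 p.2) = List.zipWith f hs ls := by
  intro hs
  induction hs with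
  | nil => intro ls; simp
  | cons h hs ih => intro ls; cases ls <;> simp [ih]

theorem zipWith_or_zipWith (g q : String → Bool) :
    ∀ (hs : List Bool) (ls : List String),
      List.zipWith (fun b ln => b || g ln) (List.zipWith (fun b ln => b || q ln) hs ls) ls
      = List.zipWith (fun b ln => b || (q ln || g ln)) hs ls := by
  intro hs
  induction hs with
  | nil => intro ls; simp
  | cons h hs ih => intro ls; cases ls <;> simp [ih, Bool.or_assoc]

theorem zipWith_fst_of_le :
    ∀ (hs : List Bool) (ls : List String), hs.length ≤ ls.length →
      List.zipWith (fun b (_ : String) => b) hs ls = hs := by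
  intro hs
  induction hs with
  | nil => intro ls _; simp
  | cons h hs ih => intro ls hl; cases ls with
    | nil => simp at hl
    | cons l ls => simp [ih ls (by simpa using hl)]

-- B's marking loop computes, line by line, "some key occurs in the line"
theorem hit_fold (keys : List String) :
    ∀ (hs : List Bool) (ls : List String), hs.length = ls.length →
      keys.foldl (fun hit key => List.zipWith (fun b ln => b || PySem.Str.isIn key ln) hit ls) hs
      = List.zipWith (fun b ln => b || keys.any (fun k => PySem.Str.isIn k ln)) hs ls := by
  induction keys with
  | nil =>
    intro hs ls hl
    simp only [List.foldl_nil, List.any_nil, Bool.or_false]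
    exact (zipWith_fst_of_le hs ls (by omega)).symm
  | cons k ks ih =>
    intro hs ls hl
    rw [List.foldl_cons, ih _ ls (by simp [List.length_zipWith]; omega), zipWith_or_zipWith]
    simp

theorem zipWith_or_replicate_false (p : String → Bool) :
    ∀ (ls : List String),
      List.zipWith (fun b ln => b || p ln) (List.replicate ls.length false) ls = ls.map p := by
  intro ls
  induction ls with
  | nil => simp
  | cons ln ls ih => simp [List.replicate_succ, ih]

-- B's cell body equals A's accumulated string
theorem cell_body_eq (keys : List String) (lines : List String) :
    PySem.Str.join "" (((lines.zip
        (keys.foldl (fun hit key => (hit.zip lines).map (fun p => p.1 || PySem.Str.isIn key p.2))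
          (List.replicate lines.length false))).filter (fun p => p.2)).map (fun p => pyCat p.1 "\n"))
    = lines.foldl (fun r ln =>
        if keys.any (fun key => PySem.Str.isIn key ln) then pyCat (pyCat r ln) "\n" else r) "" := by
  have hfun : (fun (hit : List Bool) (key : String) =>
        (hit.zip lines).map (fun p => p.1 || PySem.Str.isIn key p.2))
      = fun hit key => List.zipWith (fun b ln => b || PySem.Str.isIn key ln) hit lines := by
    funext hit key
    exact zip_map_eq_zipWith (fun b ln => b || PySem.Str.isIn key ln) hit lines
  rw [hfun, hit_fold keys _ lines (by simp), zipWith_or_replicate_false]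
  have hzip : lines.zip (lines.map (fun ln => keys.any (fun k => PySem.Str.isIn k ln)))
      = lines.map (fun ln => (ln, keys.any (fun k => PySem.Str.isIn k ln))) := by
    simpa using @List.zip_map' String String Bool id
      (fun ln => keys.any (fun k => PySem.Str.isIn k ln)) lines
  rw [hzip, List.filter_map, List.map_map,
    foldl_cat_eq_join (fun ln => keys.any (fun k => PySem.Str.isIn k ln)) lines "", empty_pyCat]
  rfl

-- the A-loop, peeled index by index, produces B's enumerate-map
theorem A_loop (result_array : List String) (key_list : List (List String)) :
    ∀ (fuel s : Nat), s + fuel = key_list.length → ∀ acc : List String,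
      (PySem.List.pyRange (s : Int) (key_list.length : Int)).foldl (fun results i =>
        let keys := PySem.List.pyGetD key_list i []
        if keys = [] then results ++ [""]
        else
          let lines := (PySem.Str.split? (PySem.List.pyGetD result_array i "") "\n").getD []
          let result := lines.foldl (fun result line =>
            if keys.any (fun key => PySem.Str.isIn key line) then pyCat (pyCat result line) "\n"
            else result) ""
          if result = "" then results ++ [pyCat "Not found any result in key=" (pyReprStrList keys)]
          else results ++ [pyCat (pyCat (pyReprStrList keys) " search result:\n") result]) acc
      = acc ++ (PySem.List.enumerate (key_list.drop s) (s : Int)).map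
          (fun ik => cellB result_array ik.1 ik.2) := by
  intro fuel
  induction fuel with
  | zero =>
    intro s hs acc
    have h1 : (key_list.length : Int) ≤ (s : Int) := by omega
    rw [PySem.List.pyRange_one_eq_nil h1]
    have h2 : key_list.drop s = [] := List.drop_eq_nil_of_le (by omega)
    simp [h2]
  | succ fuel ih =>
    intro s hs acc
    have hlt : s < key_list.length := by omega
    rw [PySem.List.pyRange_one_cons (by exact_mod_cast hlt)]
    have hcast : ((s : Int) + 1) = ((s + 1 : Nat) : Int) := by push_cast; ring
    rw [List.foldl_cons, hcast, ih (s + 1) (by omega)]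
    rw [List.drop_eq_getElem_cons hlt, PySem.List.enumerate_cons, List.map_cons, hcast]
    have hkeys : PySem.List.pyGetD key_list (s : Int) [] = key_list[s] := by
      rw [PySem.List.pyGetD_natCast, List.getD_eq_getElem _ _ hlt]
    simp only [hkeys]
    by_cases hk : key_list[s] = []
    · simp only [hk, if_pos, cellB, List.append_assoc, List.singleton_append]
    · rw [if_neg hk]
      have hcell : cellB result_array (s : Int) key_list[s]
        = (if (((PySem.Str.split? (PySem.List.pyGetD result_array (s:Int) "") "\n").getD []).foldl
              (fun result line =>
                if (key_list[s]).any (fun key => PySem.Str.isIn key line) then pyCat (pyCat result line) "\n"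
                else result) "") = ""
           then pyCat "Not found any result in key=" (pyReprStrList key_list[s])
           else pyCat (pyCat (pyReprStrList key_list[s]) " search result:\n")
             (((PySem.Str.split? (PySem.List.pyGetD result_array (s:Int) "") "\n").getD []).foldl
              (fun result line =>
                if (key_list[s]).any (fun key => PySem.Str.isIn key line) then pyCat (pyCat result line) "\n"
                else result) "")) := by
        unfold cellB
        rw [if_neg hk]
        simp only [cell_body_eq]
      rw [hcell]
      split <;> simp

-- ===== VERDICT (by name: the statement is the Claim_ definition above) =====
theorem searchKey2_spec : Claim_equal_searchKey2 := by
  intro result_array key_list _hdom _hpre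
  unfold Spec_searchKey2 searchKey2 searchKey2_alt
  have h := A_loop result_array key_list key_list.length 0 (by omega) []
  simpa using h
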